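-- pv_equiv track=rewrite | github.com/0xEodum/LW1 | EX4(11-14).py | count_diff_consonants_vowels
-- ===== SOURCE A (Python) =====
-- VOWELS_RU = "аеёиоуыэюя"
--
-- VOWELS_EN = "aeiouy"
--
-- def count_diff_consonants_vowels(text, language="ru"):
--     text = text.lower()
--
--     if language == "ru":
--         vowels = VOWELS_RU
--     elif language == "en":
--         vowels = VOWELS_EN
--
--     vowels_count = sum(1 for letter in text if letter in vowels)
--     consonants_count = sum(1 for letter in text if letter.isalpha() and letter not in vowels)
--
--     return consonants_count - vowels_count
-- ===== SOURCE B (Python) =====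
-- VOWELS_RU = "аеёиоуыэюя"
--
-- VOWELS_EN = "aeiouy"
--
-- def count_diff_consonants_vowels(text, language="ru"):
--     text = text.lower()
--
--     if language == "ru":
--         vowels = VOWELS_RU
--     elif language == "en":
--         vowels = VOWELS_EN
--
--     diff = 0
--     for letter in text:
--         if letter in vowels:
--             diff -= 1
--         elif letter.isalpha():
--             diff += 1
--     return diff
-- ===== Notes on version B (the rewrite author's own statement) =====
-- stated objective: simpler
-- what changed: Replaces A's two separate counting passes (vowel count, then consonant count, then subtraction) by one pass maintaining a single running balance that is decremented on vowels and incremented on other letters.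
import Mathlib
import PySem

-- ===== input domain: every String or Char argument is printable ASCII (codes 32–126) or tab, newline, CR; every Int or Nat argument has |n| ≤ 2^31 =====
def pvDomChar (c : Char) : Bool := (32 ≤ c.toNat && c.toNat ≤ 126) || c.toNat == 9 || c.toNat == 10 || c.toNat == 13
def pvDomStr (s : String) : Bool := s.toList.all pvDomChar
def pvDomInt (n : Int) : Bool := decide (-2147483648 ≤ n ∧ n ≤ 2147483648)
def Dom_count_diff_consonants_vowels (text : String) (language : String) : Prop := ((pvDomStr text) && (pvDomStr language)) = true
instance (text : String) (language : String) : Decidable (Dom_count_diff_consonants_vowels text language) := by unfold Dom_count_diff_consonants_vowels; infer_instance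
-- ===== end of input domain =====

-- B replaces A's two counting passes by one pass with a single running balance (same result, same cost).

-- ===== PORT A =====
def VOWELS_RU : List Char := "аеёиоуыэюя".toList
def VOWELS_EN : List Char := "aeiouy".toList

def count_diff_consonants_vowels (text : String) (language : String) : Int :=
  let t := PySem.Chars.lower text.toList
  let vowels := if language = "ru" then VOWELS_RU else VOWELS_EN
  let vowels_count : Int := (t.countP (fun letter => vowels.contains letter) : Int)
  let consonants_count : Int :=
    (t.countP (fun letter => PySem.Chars.isalpha letter && !vowels.contains letter) : Int)
  consonants_count - vowels_count

-- ===== PORT B =====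
def count_diff_consonants_vowels_alt (text : String) (language : String) : Int :=
  let t := PySem.Chars.lower text.toList
  let vowels := if language = "ru" then VOWELS_RU else VOWELS_EN
  t.foldl (fun diff letter =>
      if vowels.contains letter then diff - 1
      else if PySem.Chars.isalpha letter then diff + 1
      else diff) 0

-- ===== PRECONDITION & SPEC =====
-- Pre_ excludes languages other than "ru"/"en" with nonempty text: there Python A (and B) raise NameError,
-- vowels being unbound (with empty text the generators never evaluate vowels, so A returns 0 and is claimed).
def Pre_count_diff_consonants_vowels (text : String) (language : String) : Prop :=
  language = "ru" ∨ language = "en" ∨ text = ""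
instance (text : String) (language : String) : Decidable (Pre_count_diff_consonants_vowels text language) := by unfold Pre_count_diff_consonants_vowels; infer_instance

def pvWitness_count_diff_consonants_vowels : String × String := ("Hello, World!", "en")

def Spec_count_diff_consonants_vowels (text : String) (language : String) (out : Int) : Prop := out = count_diff_consonants_vowels_alt text language
instance (text : String) (language : String) (out : Int) : Decidable (Spec_count_diff_consonants_vowels text language out) := by unfold Spec_count_diff_consonants_vowels; infer_instance

-- ===== CLAIM (what is proved, stated in full; the proofs are below) =====
def Claim_equal_count_diff_consonants_vowels : Prop := ∀ (text : String) (language : String), Dom_count_diff_consonants_vowels text language → Pre_count_diff_consonants_vowels text language → Spec_count_diff_consonants_vowels text language (count_diff_consonants_vowels text language)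

-- ===== LEMMAS AND PROOFS =====
theorem balance_fold_eq (vowels t : List Char) : ∀ (d : Int),
    t.foldl (fun diff letter =>
      if vowels.contains letter then diff - 1
      else if PySem.Chars.isalpha letter then diff + 1
      else diff) d
    = d + (t.countP (fun letter => PySem.Chars.isalpha letter && !vowels.contains letter) : Int)
        - (t.countP (fun letter => vowels.contains letter) : Int) := by
  induction t with
  | nil => intro d; simp
  | cons c cs ih =>
    intro d
    rw [List.foldl_cons, List.countP_cons, List.countP_cons, ih]
    by_cases hv : c ∈ vowels <;> by_cases ha : PySem.Chars.isalpha c = true <;>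
      simp [hv, ha] <;> push_cast <;> ring

-- ===== VERDICT (by name: the statement is the Claim_ definition above) =====
theorem count_diff_consonants_vowels_spec : Claim_equal_count_diff_consonants_vowels := by
  intro text language _ _
  unfold Spec_count_diff_consonants_vowels count_diff_consonants_vowels count_diff_consonants_vowels_alt
  simp only [balance_fold_eq]
  ring
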